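-- pv_equiv track=rewrite | github.com/SERGABACH/lab04 | lib.py | count_common_elements
-- ===== SOURCE A (Python) =====
-- def count_common_elements(lists):
--     count_dict = {}
--
--     for lst in lists:
--         for element in lst:
--             if element in count_dict:
--                 count_dict[element] += 1
--             else:
--                 count_dict[element] = 1
--
--     common_count = 0
--     for count in count_dict.values():
--         if count == len(lists):
--             common_count += 1
--
--     return common_count
-- ===== SOURCE B (Python) =====
-- def count_common_elements(lists):
--     flat = sorted(e for lst in lists for e in lst)
--     n = len(lists)
--     total = 0
--     i = 0
--     while i < len(flat):
--         j = i + 1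
--         while j < len(flat) and flat[j] == flat[i]:
--             j += 1
--         if j - i == n:
--             total += 1
--         i = j
--     return total
-- ===== Notes on version B (the rewrite author's own statement) =====
-- stated objective: alternative
-- what changed: Replaces A's accumulated occurrence dictionary with flatten + sort + a single run-length scan over the sorted list: a run of length len(lists) is one common element, so no occurrence table is kept.
import Mathlib
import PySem

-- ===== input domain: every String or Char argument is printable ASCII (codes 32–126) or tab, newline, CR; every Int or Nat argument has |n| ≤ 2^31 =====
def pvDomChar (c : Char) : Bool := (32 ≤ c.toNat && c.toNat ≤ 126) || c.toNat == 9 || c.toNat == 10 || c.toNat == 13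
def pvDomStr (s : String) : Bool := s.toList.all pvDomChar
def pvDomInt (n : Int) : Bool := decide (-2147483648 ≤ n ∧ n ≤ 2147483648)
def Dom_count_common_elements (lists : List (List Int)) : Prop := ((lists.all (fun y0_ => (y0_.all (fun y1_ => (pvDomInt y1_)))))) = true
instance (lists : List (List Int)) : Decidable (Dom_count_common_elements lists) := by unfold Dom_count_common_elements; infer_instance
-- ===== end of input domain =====

-- B replaces A's accumulated occurrence dictionary with flatten + sort + one run-length scan
-- (a run of length len(lists) is one common element): an alternative, table-free algorithm.


-- ===== PORT A =====
def count_common_elements (lists : List (List Int)) : Int :=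
  -- count_dict = {}; nested for-loops incrementing or initialising the count
  let count_dict : PySem.Dict Int Int :=
    lists.foldl (fun d lst =>
      lst.foldl (fun d element =>
        if d.contains element then d.insert element (d.getD element 0 + 1)
        else d.insert element 1) d) PySem.Dict.empty
  -- common_count loop over count_dict.values()
  count_dict.values.foldl (fun common_count count =>
    if count == (lists.length : Int) then common_count + 1 else common_count) 0

-- ===== PORT B =====
-- the outer 'while i < len(flat)' scan of Source B: each step consumes one maximal run
-- (the inner 'while j' advance is takeWhile/dropWhile of the elements equal to flat[i])
def runCount (s : List Int) (n : Nat) : Int :=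
  match s with
  | [] => 0
  | x :: rest =>
    (if (rest.takeWhile (fun y => y == x)).length + 1 == n then (1 : Int) else 0)
      + runCount (rest.dropWhile (fun y => y == x)) n
termination_by s.length
decreasing_by
  have := (List.dropWhile_sublist (l := rest) (fun y => y == x)).length_le
  simp; omega

def count_common_elements_alt (lists : List (List Int)) : Int :=
  let flat : List Int := lists.flatMap (fun lst => lst)   -- the flattening comprehension
  runCount (PySem.List.sorted flat (fun e => e) false) lists.length

-- ===== PRECONDITION & SPEC =====
def Spec_count_common_elements (lists : List (List Int)) (out : Int) : Prop := out = count_common_elements_alt lists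
instance (lists : List (List Int)) (out : Int) : Decidable (Spec_count_common_elements lists out) := by unfold Spec_count_common_elements; infer_instance

-- ===== CLAIM (what is proved, stated in full; the proofs are below) =====
def Claim_equal_count_common_elements : Prop := ∀ (lists : List (List Int)), Dom_count_common_elements lists → Spec_count_common_elements lists (count_common_elements lists)

-- ===== LEMMAS AND PROOFS =====

-- A's branching increment is the unconditional 'insert x (getD x 0 + 1)' step of a Counter
lemma step_eq (d : PySem.Dict Int Int) (x : Int) :
    (if d.contains x then d.insert x (d.getD x 0 + 1) else d.insert x 1)
      = d.insert x (d.getD x 0 + 1) := by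
  by_cases h : d.contains x = true
  · simp [h]
  · have hg : d.get? x = none := by
      cases hq : d.get? x with
      | none => rfl
      | some v => exact absurd (PySem.Dict.contains_eq_isSome_get? d x ▸ (by simp [hq])) h
    simp [h, PySem.Dict.getD, hg]

-- the nested counting loops build collections.Counter(flat)
lemma dict_eq_counter (lists : List (List Int)) :
    lists.foldl (fun (d : PySem.Dict Int Int) lst =>
      lst.foldl (fun d element =>
        if d.contains element then d.insert element (d.getD element 0 + 1)
        else d.insert element 1) d) PySem.Dict.empty
      = PySem.Dict.counter (lists.flatMap (fun lst => lst)) := by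
  have hstep : ∀ (d : PySem.Dict Int Int) (lst : List Int),
      lst.foldl (fun d element =>
        if d.contains element then d.insert element (d.getD element 0 + 1)
        else d.insert element 1) d
      = lst.foldl (fun d x => d.insert x (d.getD x 0 + 1)) d := by
    intro d lst
    exact PySem.List.foldl_congr_mem _ _ _ _ (fun acc x _ => step_eq acc x)
  calc lists.foldl (fun (d : PySem.Dict Int Int) lst =>
        lst.foldl (fun d element =>
          if d.contains element then d.insert element (d.getD element 0 + 1)
          else d.insert element 1) d) PySem.Dict.empty
      = lists.foldl (fun d lst => lst.foldl (fun d x => d.insert x (d.getD x 0 + 1)) d)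
          PySem.Dict.empty :=
        PySem.List.foldl_congr_mem _ _ _ _ (fun acc lst _ => hstep acc lst)
    _ = (lists.flatMap (fun lst => lst)).foldl
          (fun d x => d.insert x (d.getD x 0 + 1)) PySem.Dict.empty := by
        rw [List.flatMap_id', List.foldl_flatten]
    _ = PySem.Dict.counter (lists.flatMap (fun lst => lst)) := by
        rw [List.flatMap_id']
        exact PySem.Dict.foldl_insert_getD_add_one_eq_counter _

-- on a sorted (Pairwise ≤) list, the run-length scan counts the distinct elements
-- whose multiplicity is n
lemma runCount_sorted (s : List Int) (n : Nat) (hs : List.Pairwise (· ≤ ·) s) :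
    runCount s n
      = ((PySem.Set.ofList s).countP (fun e => s.count e == n) : Int) := by
  induction s using runCount.induct with
  | case1 => simp [runCount, PySem.Set.ofList]
  | case2 x rest ih =>
    have hsplit : rest.takeWhile (fun y => y == x) ++ rest.dropWhile (fun y => y == x)
        = rest := List.takeWhile_append_dropWhile
    set run := rest.takeWhile (fun y => y == x) with hrundef
    set rest' := rest.dropWhile (fun y => y == x) with hrest'def
    have hrun : ∀ y ∈ run, y = x := by
      intro y hy
      simpa using List.mem_takeWhile_imp hy
    -- x ≤ every element of rest, rest is sorted
    have hle : ∀ y ∈ rest, x ≤ y := (List.pairwise_cons.mp hs).1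
    have hrestsorted : List.Pairwise (· ≤ ·) rest := (List.pairwise_cons.mp hs).2
    have hsub : rest'.Sublist rest := List.dropWhile_sublist _
    have hsorted' : List.Pairwise (· ≤ ·) rest' := hrestsorted.sublist hsub
    -- x does not occur in rest'
    have hxnot : x ∉ rest' := by
      intro hmem
      cases hr : rest' with
      | nil => simp [hr] at hmem
      | cons y t =>
        have hy : ¬ ((fun y => y == x) y = true) := by
          have := List.head?_dropWhile_not (fun y => y == x) rest
          rw [← hrest'def, hr] at this
          simp at this; simp [this]
        have hyne : y ≠ x := by simpa using hy
        have hxlt : x < y := lt_of_le_of_ne (hle y (hsub.mem (hr ▸ List.mem_cons_self))) (Ne.symm hyne)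
        rw [hr] at hmem
        rcases List.mem_cons.mp hmem with h | h
        · exact hyne h.symm
        · have : y ≤ x := by
            have hp := hr ▸ hsorted'
            exact (List.pairwise_cons.mp hp).1 x h
          omega
    -- multiplicities in s = x :: rest
    have hcount_run : run.count x = run.length :=
      List.count_eq_length.mpr (fun y hy => ((hrun y hy).symm ▸ rfl))
    have hcount_x : (x :: rest).count x = run.length + 1 := by
      rw [List.count_cons_self, ← hsplit, List.count_append, hcount_run,
        List.count_eq_zero.mpr hxnot]
    have hcount_ne : ∀ e, e ≠ x → (x :: rest).count e = rest'.count e := by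
      intro e he
      have h1 : (x :: rest).count e = rest.count e := by
        simp [Ne.symm he]
      rw [h1, ← hsplit, List.count_append,
        List.count_eq_zero.mpr (fun hmem => he (hrun e hmem)), Nat.zero_add]
    -- the distinct elements of s are x plus those of rest'
    have hperm : (PySem.Set.ofList (x :: rest)).Perm (x :: PySem.Set.ofList rest') := by
      refine (List.perm_ext_iff_of_nodup (PySem.Set.nodup_ofList _) ?_).mpr ?_
      · exact List.nodup_cons.mpr ⟨by simpa [PySem.Set.mem_ofList] using hxnot,
          PySem.Set.nodup_ofList _⟩
      · intro e
        simp only [PySem.Set.mem_ofList, List.mem_cons]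
        constructor
        · rintro (h | h)
          · exact Or.inl h
          · rw [← hsplit] at h
            rcases List.mem_append.mp h with h | h
            · exact Or.inl (hrun e h)
            · exact Or.inr (by simpa [PySem.Set.mem_ofList] using h)
        · rintro (h | h)
          · exact Or.inl h
          · exact Or.inr (hsub.mem (by simpa [PySem.Set.mem_ofList] using h))
    rw [runCount, ← hrundef, ← hrest'def, ih hsorted',
      hperm.countP_eq (fun e => (x :: rest).count e == n)]
    rw [List.countP_cons]
    have hpred : ∀ e ∈ PySem.Set.ofList rest',
        ((x :: rest).count e == n) = (rest'.count e == n) := by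
      intro e he
      have hne : e ≠ x := fun h => hxnot (h ▸ (PySem.Set.mem_ofList _ _).mp he)
      rw [hcount_ne e hne]
    have hcp : List.countP (fun e => (x :: rest).count e == n) (PySem.Set.ofList rest')
        = List.countP (fun e => rest'.count e == n) (PySem.Set.ofList rest') :=
      List.countP_congr (fun e he => by rw [hpred e he])
    rw [hcp]
    simp only [hcount_x]
    by_cases h : run.length + 1 = n
    · simp [h]; ring
    · have : (run.length + 1 == n) = false := by simpa using h
      simp [this]
-- run-length scan of the sorted flattening = distinct-element count test (main bridge)
lemma alt_eq_countP (lists : List (List Int)) :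
    count_common_elements_alt lists
      = ((PySem.Set.ofList (lists.flatMap (fun lst => lst))).countP
          (fun e => (lists.flatMap (fun lst => lst)).count e == lists.length) : Int) := by
  unfold count_common_elements_alt
  set flat := lists.flatMap (fun lst => lst) with hflat
  set s := PySem.List.sorted flat (fun e => e) false with hs
  have hperm : s.Perm flat := PySem.List.sorted_perm flat (fun e => e) false
  have hpair : List.Pairwise (· ≤ ·) s := PySem.List.sorted_pairwise flat (fun e => e)
  rw [runCount_sorted s lists.length hpair]
  have hsets : (PySem.Set.ofList s).Perm (PySem.Set.ofList flat) := by
    refine (List.perm_ext_iff_of_nodup (PySem.Set.nodup_ofList _)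
      (PySem.Set.nodup_ofList _)).mpr ?_
    intro e
    simp only [PySem.Set.mem_ofList]
    exact hperm.mem_iff
  rw [hsets.countP_eq]
  congr 1
  refine List.countP_congr (fun e _ => ?_)
  rw [hperm.count_eq]

-- ===== VERDICT (by name: the statement is the Claim_ definition above) =====
theorem count_common_elements_spec : Claim_equal_count_common_elements := by
  intro lists _
  unfold Spec_count_common_elements count_common_elements
  rw [dict_eq_counter, alt_eq_countP]
  rw [PySem.List.foldl_if_add_one]
  rw [PySem.Dict.values, PySem.Dict.items_counter]
  rw [List.map_map, List.countP_map]
  norm_cast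
  simp only [Nat.zero_add]
  refine List.countP_congr (fun x _ => ?_)
  simp [Function.comp]
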